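-- pv_equiv track=rewrite | github.com/pty9714/SSAFY_10_class11_algorithm | 20240226/python/giryun.py | solution
-- ===== SOURCE A (Python) =====
-- def solution(n, s):
--     answer = []
--     q, r = divmod(s, n)
--     if (n > s): return [-1]
--     for i in range(n):
--         answer.append(q)
--     for i in range(r):
--         answer[i] += 1
--     return sorted(answer)
-- ===== SOURCE B (Python) =====
-- def solution(n, s):
--     # Greedy fair split: repeatedly give the floor of the remaining average.
--     # n == 0 is outside the precondition (A raises ZeroDivisionError there).
--     if n > s:
--         return [-1]
--     out = []
--     while n > 0:
--         p = s // n
--         out.append(p)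
--         s -= p
--         n -= 1
--     return out
-- ===== Notes on version B (the rewrite author's own statement) =====
-- stated objective: alternative
-- what changed: Replaces fill-then-increment-then-sort with a greedy single loop that repeatedly emits the floor of the remaining average (s//n), subtracting it from s and decrementing n; the output is ascending by construction so no sort is needed.
import Mathlib
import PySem

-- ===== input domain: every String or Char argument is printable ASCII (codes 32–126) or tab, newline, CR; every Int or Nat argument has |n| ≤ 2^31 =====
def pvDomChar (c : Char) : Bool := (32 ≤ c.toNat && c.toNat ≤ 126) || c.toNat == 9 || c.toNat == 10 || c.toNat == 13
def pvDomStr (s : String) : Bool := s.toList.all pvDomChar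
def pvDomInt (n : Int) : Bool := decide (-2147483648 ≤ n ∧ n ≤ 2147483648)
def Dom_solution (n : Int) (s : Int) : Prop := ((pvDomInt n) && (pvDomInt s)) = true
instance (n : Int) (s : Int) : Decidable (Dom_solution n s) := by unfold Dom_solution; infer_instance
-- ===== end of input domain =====

-- B replaces A's fill loop + increment loop + final sort by a greedy single loop
-- that emits the floor of the remaining average (s // n) each step (alternative algorithm).

-- ===== PORT A =====
def solution (n : Int) (s : Int) : List Int :=
  match PySem.Int.divmod? s n with
  | none => []   -- n = 0: Python raises ZeroDivisionError; excluded by Pre_solution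
  | some (q, r) =>
    if n > s then [-1]
    else
      let answer : List Int := (PySem.List.pyRange 0 n 1).foldl (fun acc _ => acc ++ [q]) []
      let answer := (PySem.List.pyRange 0 r 1).foldl
        (fun acc i => PySem.List.pySetD acc i (PySem.List.pyGetD acc i 0 + 1)) answer
      PySem.List.sorted answer (fun x => x) false

-- ===== PORT B =====
-- B's while loop: fuel = n.toNat counts exactly the iterations with n > 0.
def solGo (fuel : Nat) (n : Int) (s : Int) (out : List Int) : List Int :=
  match fuel with
  | 0 => out
  | f + 1 =>
    let p := PySem.Int.floordiv s n
    solGo f (n - 1) (s - p) (out ++ [p])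

def solution_alt (n : Int) (s : Int) : List Int :=
  if n > s then [-1]
  else solGo n.toNat n s []

-- ===== PRECONDITION & SPEC =====
-- Pre_ excludes only n = 0, where the Python A raises ZeroDivisionError (divmod by zero).
def Pre_solution (n : Int) (s : Int) : Prop := n ≠ 0
instance (n : Int) (s : Int) : Decidable (Pre_solution n s) := by unfold Pre_solution; infer_instance
def pvWitness_solution : Int × Int := (3, 7)
def Spec_solution (n : Int) (s : Int) (out : List Int) : Prop := out = solution_alt n s
instance (n : Int) (s : Int) (out : List Int) : Decidable (Spec_solution n s out) := by unfold Spec_solution; infer_instance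

-- ===== CLAIM (what is proved, stated in full; the proofs are below) =====
def Claim_equal_solution : Prop := ∀ (n : Int) (s : Int), Dom_solution n s → Pre_solution n s → Spec_solution n s (solution n s)

-- ===== LEMMAS AND PROOFS =====

-- A's first loop appends one q per range element.
theorem fill_loop (q : Int) (l : List Int) (a : List Int) :
    l.foldl (fun acc _ => acc ++ [q]) a = a ++ List.replicate l.length q := by
  induction l generalizing a with
  | nil => simp
  | cons x t ih => simp [List.foldl, ih, List.replicate_succ, List.append_assoc]

-- A's second loop turns the first r copies of q into q+1.
theorem inc_loop (q : Int) (r m : Nat) (h : r ≤ m) :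
    (PySem.List.pyRange 0 (r : Int) 1).foldl
      (fun acc i => PySem.List.pySetD acc i (PySem.List.pyGetD acc i 0 + 1))
      (List.replicate m q)
    = List.replicate r (q + 1) ++ List.replicate (m - r) q := by
  induction r with
  | zero => simp [PySem.List.pyRange_one_eq_nil]
  | succ k ih =>
    have hk : k ≤ m := Nat.le_of_succ_le h
    have hsplit : PySem.List.pyRange 0 ((k : Int) + 1) 1 =
        PySem.List.pyRange 0 (k : Int) 1 ++ [(k : Int)] :=
      PySem.List.pyRange_one_succ_right (by exact_mod_cast Nat.zero_le k)
    have : ((Nat.succ k : Nat) : Int) = (k : Int) + 1 := by push_cast; ring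
    rw [this, hsplit, List.foldl_append, ih hk]
    simp only [List.foldl]
    have hget : PySem.List.pyGetD (List.replicate k (q + 1) ++ List.replicate (m - k) q) (k : Int) 0 = q := by
      rw [PySem.List.pyGetD_natCast]
      rw [List.getD_eq_getElem?_getD, List.getElem?_append_right (by simp)]
      simp [show 0 < m - k by omega]
    have hset : PySem.List.pySetD (List.replicate k (q + 1) ++ List.replicate (m - k) q) (k : Int) (q + 1)
        = List.replicate (k + 1) (q + 1) ++ List.replicate (m - (k + 1)) q := by
      rw [PySem.List.pySetD_natCast]
      rw [List.set_append_right _ _ (by simp)]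
      simp only [List.length_replicate, Nat.sub_self]
      have hmk : m - k = (m - (k + 1)) + 1 := by omega
      rw [hmk, List.replicate_succ, List.set_cons_zero]
      rw [List.replicate_succ' (n := k)]
      simp [List.append_assoc]
    rw [hget, hset]

-- B's greedy loop on input m*q + r (0 ≤ r, and r < m unless r = 0) emits
-- m - r copies of q followed by r copies of q + 1.
theorem greedy_loop (m : Nat) : ∀ (q r : Int) (acc : List Int),
    0 ≤ r → (r < (m : Int) ∨ r = 0) →
    solGo m (m : Int) ((m : Int) * q + r) acc
      = acc ++ List.replicate (m - r.toNat) q ++ List.replicate r.toNat (q + 1) := by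
  induction m with
  | zero =>
    intro q r acc h0 hlt
    have hr : r = 0 := by omega
    simp [solGo, hr]
  | succ k ih =>
    intro q r acc h0 hlt
    have hrm : r < (k : Int) + 1 := by
      rcases hlt with h | h
      · exact_mod_cast h
      · omega
    have hp : PySem.Int.floordiv (((k : Nat) + 1 : Nat) * q + r) (((k : Nat) + 1 : Nat)) = q := by
      rw [PySem.Int.floordiv_eq_iff_of_pos (by push_cast; omega)]
      push_cast
      constructor <;> nlinarith
    have hcast : (((k : Nat) + 1 : Nat) : Int) = (k : Int) + 1 := by push_cast; ring
    simp only [solGo]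
    rw [show (((k + 1 : Nat) : Int)) = (k : Int) + 1 from by push_cast; ring] at hp ⊢
    rw [hp]
    have hstep : ((k : Int) + 1) * q + r - q = (k : Int) * q + r := by ring
    rw [show (k : Int) + 1 - 1 = (k : Int) from by ring, hstep]
    by_cases hk : r < (k : Int)
    · rw [ih q r (acc ++ [q]) h0 (Or.inl hk)]
      have h1 : k + 1 - r.toNat = (k - r.toNat) + 1 := by omega
      rw [h1, List.replicate_succ]
      simp [List.append_assoc]
    · -- r = k (since r < k+1 and ¬ r < k) or r = 0 with k = 0 handled the same way
      have hrk : r = (k : Int) := by omega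
      have : (k : Int) * q + r = (k : Int) * (q + 1) + 0 := by rw [hrk]; ring
      rw [this, ih (q + 1) 0 (acc ++ [q]) le_rfl (Or.inr rfl)]
      have h2 : r.toNat = k := by omega
      simp [h2, List.append_assoc]

theorem solution_spec : Claim_equal_solution := by
  intro n s _ hn
  unfold Spec_solution solution solution_alt
  have hdm : PySem.Int.divmod? s n =
      some (PySem.Int.floordiv s n, PySem.Int.mod s n) := by
    simp only [PySem.Int.divmod?, PySem.Int.floordiv, PySem.Int.mod, if_neg hn]
  rw [hdm]
  by_cases hg : n > s
  · simp [hg]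
  · simp only [hg, if_false]
    set q := PySem.Int.floordiv s n with hq
    set r := PySem.Int.mod s n with hr
    rcases lt_or_gt_of_ne hn with hneg | hpos
    · -- n < 0: A's loops are empty and the sort of [] is []; B's loop runs zero times
      have hr0 : r ≤ 0 := (PySem.Int.mod_neg_bounds s hneg).2
      rw [PySem.List.pyRange_one_eq_nil (le_of_lt hneg),
          PySem.List.pyRange_one_eq_nil hr0]
      simp only [List.foldl_nil]
      have h1 : n.toNat = 0 := by omega
      rw [h1]
      simp [PySem.List.sorted, solGo]
    · -- n > 0: A yields r copies of q+1 then n-r of q, sorted to B's greedy output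
      have hr0 : 0 ≤ r := PySem.Int.mod_nonneg s hpos
      have hrn : r < n := PySem.Int.mod_lt s hpos
      rw [fill_loop]
      simp only [List.nil_append, PySem.List.length_pyRange_one]
      have hcast : r = ((r.toNat : Nat) : Int) := by omega
      have hle : r.toNat ≤ (n - 0).toNat := by omega
      rw [hcast, inc_loop q r.toNat (n - 0).toNat hle]
      have hs : s = n * q + r := by
        have := PySem.Int.floordiv_mul_add_mod s n
        rw [← hq, ← hr] at this
        linarith
      have hB : solGo n.toNat n s [] =
          [] ++ List.replicate (n.toNat - r.toNat) q ++ List.replicate r.toNat (q + 1) := by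
        have hg2 := greedy_loop n.toNat q r [] hr0 (Or.inl (by omega))
        rw [show ((n.toNat : Nat) : Int) = n from by omega, ← hs] at hg2
        exact hg2
      rw [hB]
      apply PySem.List.sorted_id_eq_of_perm_of_pairwise
      · have : (n - 0).toNat - r.toNat = n.toNat - r.toNat := by omega
        rw [this]
        simp only [List.nil_append]
        exact List.perm_append_comm
      · refine List.pairwise_append.mpr ⟨List.pairwise_replicate.mpr (Or.inr le_rfl),
          List.pairwise_replicate.mpr (Or.inr le_rfl), ?_⟩
        intro a ha b hb
        rw [List.eq_of_mem_replicate ha, List.eq_of_mem_replicate hb]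
        omega

-- ===== VERDICT (by name: the statement is the Claim_ definition above) =====
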